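-- pv_equiv track=rewrite | github.com/stain/scrapbook | diverse/kid.py | modulus10
-- ===== SOURCE A (Python) =====
-- def enkeltsiffer(produkter):
--     """Returnerer ett og ett siffer i et array av produkter"""
--     for element in produkter:
--         sifre = [int(siffer) for siffer in str(element)]
--
--         for siffer in sifre:
--             yield siffer
--
-- def modulus10(fakturanr):
--     """Returnerer kontrollsiffer for fakturanr regnet ut etter metoden
--     Modulus 10 beskrevet i Brukerhåndbok OCRGiro Systemspesifikasjon,
--     som kan legges til på slutten av fakturanr for å få en gyldig KID.
--
--     Fakturanr må være en streng, siden ledende 0 er tillatt"""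
--
--     fakturanr = [int(element) for element in str(fakturanr)]
--     lengde = len(fakturanr)
--
--     #print "Fakturanr:", fakturanr
--     #print "Lengde:", lengde
--
--     vekttall = [0] * lengde
--     produkter = [0] * lengde
--
--     odde = 1
--     for i in range(lengde -1, 0 - 1, -1):
--         if(odde):
--             vekttall[i] = 2
--             odde = 0
--         else:
--             vekttall[i] = 1
--             odde = 1
--
--     #print "Vekttall:", vekttall
--     for i in range(lengde):
--         produkter[i] = fakturanr[i] * vekttall[i]
--
--
--     #print "Produkter:", produkter
--
--     siffersum = 0
--     for siffer in enkeltsiffer(produkter):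
--         siffersum += siffer
--
--     siffersum = [int(element) for element in str(siffersum)]
--     #print "Siffersum:", siffersum
--
--     entallssiffer = siffersum[-1]
--
--     if entallssiffer == 0:
--         return "0"
--
--     return str(10 - entallssiffer)
-- ===== SOURCE B (Python) =====
-- def modulus10(fakturanr):
--     total = 0
--     weight = 2
--     for ch in reversed(str(fakturanr)):
--         d = int(ch)
--         if weight == 2:
--             p = 2 * d
--             total += p if p < 10 else p - 9
--             weight = 1
--         else:
--             total += d
--             weight = 2
--     return str((10 - total % 10) % 10)
-- ===== Notes on version B (the rewrite author's own statement) =====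
-- stated objective: simpler
-- what changed: Replaces A's weight and product arrays, digit-splitting generator and str()-based last-digit extraction with a single pass over the reversed string that adds each digit's Luhn contribution arithmetically (2*d, minus 9 when >= 10) and returns str((10 - total % 10) % 10).
import Mathlib
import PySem

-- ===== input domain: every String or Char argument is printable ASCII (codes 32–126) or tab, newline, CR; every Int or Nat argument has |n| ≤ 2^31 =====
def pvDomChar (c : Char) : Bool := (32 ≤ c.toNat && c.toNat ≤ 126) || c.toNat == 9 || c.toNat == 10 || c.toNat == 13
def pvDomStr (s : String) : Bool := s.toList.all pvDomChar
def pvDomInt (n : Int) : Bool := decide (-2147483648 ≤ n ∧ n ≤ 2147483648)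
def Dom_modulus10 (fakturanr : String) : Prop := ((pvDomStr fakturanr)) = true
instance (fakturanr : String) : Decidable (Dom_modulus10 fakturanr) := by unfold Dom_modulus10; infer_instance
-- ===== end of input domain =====

-- B replaces A's weight/product arrays, digit-splitting generator and str()-based last-digit
-- extraction by one pass over the reversed string adding Luhn contributions arithmetically (simpler).


-- ===== PORT A =====
-- int(c) for one character, as both Pythons' int(...) on single chars (default unreachable under Pre_)
def pvDig (c : Char) : Int := (PySem.Int.ofChars? [c]).getD 0

def modulus10 (fakturanr : String) : String :=
  -- fakturanr = [int(element) for element in str(fakturanr)]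
  let ds : List Int := fakturanr.toList.map pvDig
  let lengde : Int := ds.length
  -- vekttall loop: for i in range(lengde-1, -1, -1) with the odde toggle
  let st := (PySem.List.pyRange (lengde - 1) (-1) (-1)).foldl
      (fun (st : List Int × Int) i =>
        if st.2 ≠ 0 then (st.1.set i.toNat 2, 0) else (st.1.set i.toNat 1, 1))
      (List.replicate ds.length 0, 1)
  let vekttall := st.1
  -- produkter loop: for i in range(lengde)
  let produkter := (PySem.List.pyRange 0 lengde 1).foldl
      (fun (p : List Int) i =>
        p.set i.toNat (PySem.List.pyGetD ds i 0 * PySem.List.pyGetD vekttall i 0))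
      (List.replicate ds.length 0)
  -- siffersum over enkeltsiffer(produkter): the generator flattens the digits of each product
  let siffersum : Int :=
    (produkter.flatMap (fun p => (PySem.Int.toChars p).map pvDig)).foldl (· + ·) 0
  let siffersumDigits : List Int := (PySem.Int.toChars siffersum).map pvDig
  let entallssiffer : Int := (PySem.List.pyGet? siffersumDigits (-1)).getD 0
  if entallssiffer = 0 then "0" else PySem.Int.toStr (10 - entallssiffer)

-- ===== PORT B =====
def modulus10_alt (fakturanr : String) : String :=
  let st := fakturanr.toList.reverse.foldl
      (fun (st : Int × Int) ch =>
        let d := pvDig ch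
        if st.2 = 2 then (st.1 + (if 2 * d < 10 then 2 * d else 2 * d - 9), 1)
        else (st.1 + d, 2))
      (0, 2)
  PySem.Int.toStr (PySem.Int.mod (10 - PySem.Int.mod st.1 10) 10)

-- ===== PRECONDITION & SPEC =====
-- Pre_ excludes exactly the strings containing a non-digit character, on which A's int(element) raises ValueError.
def Pre_modulus10 (fakturanr : String) : Prop :=
  fakturanr.toList.all (fun c => c ∈ (['0','1','2','3','4','5','6','7','8','9'] : List Char)) = true
instance (fakturanr : String) : Decidable (Pre_modulus10 fakturanr) := by unfold Pre_modulus10; infer_instance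
def pvWitness_modulus10 : String := "123"

def Spec_modulus10 (fakturanr : String) (out : String) : Prop := out = modulus10_alt fakturanr
instance (fakturanr : String) (out : String) : Decidable (Spec_modulus10 fakturanr out) := by unfold Spec_modulus10; infer_instance

-- ===== CLAIM (what is proved, stated in full; the proofs are below) =====
def Claim_equal_modulus10 : Prop := ∀ (fakturanr : String), Dom_modulus10 fakturanr → Pre_modulus10 fakturanr → Spec_modulus10 fakturanr (modulus10 fakturanr)

-- ===== LEMMAS AND PROOFS =====

-- the weight written in iteration k of A's vekttall loop, when the toggle started at o
def pvWgt (o : Int) (k : Nat) : Int := if ((o ≠ 0) ↔ k % 2 = 0) then 2 else 1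

-- Luhn digit contribution of a doubled digit
def pvDs2 (d : Int) : Int := if 2 * d < 10 then 2 * d else 2 * d - 9

-- canonical checksum of the digit list (weight 2 on the rightmost digit, alternating)
def pvS : List Int → Int
  | [] => 0
  | d :: t => (if t.length % 2 = 0 then pvDs2 d else d) + pvS t

-- digit sum of str(p), as A's generator computes it
def pvDsum (p : Int) : Int := ((PySem.Int.toChars p).map pvDig).sum

theorem pre_mem (f : String) (h : Pre_modulus10 f) :
    ∀ c ∈ f.toList, c ∈ ['0','1','2','3','4','5','6','7','8','9'] := by
  intro c hc
  have h2 := List.all_eq_true.mp h c hc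
  simpa using h2

theorem pvDig_bounds (c : Char) (h : c ∈ ['0','1','2','3','4','5','6','7','8','9']) :
    0 ≤ pvDig c ∧ pvDig c ≤ 9 := by
  fin_cases h <;> decide

theorem pyRange_down (n : Nat) :
    PySem.List.pyRange ((n:Int) - 1) (-1) (-1) = (List.range n).map (fun k : Nat => (n:Int) - 1 - (k:Int)) := by
  unfold PySem.List.pyRange
  have h0 : ¬ ((0:Int) < -1) := by norm_num
  rw [if_neg (by norm_num)]
  simp only [h0, if_false]
  by_cases hn : (-1:Int) < (n:Int) - 1
  · rw [if_pos hn]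
    have h1 : ((n:Int) - 1 - -1 + -(-1) - 1) / -(-1) = (n:Int) := by norm_num
    rw [h1, Int.toNat_natCast]
    apply List.map_congr_left
    intro k _
    ring
  · rw [if_neg hn]
    have : n = 0 := by omega
    subst this
    simp

theorem pyGet_neg_one (l : List Int) (h : l ≠ []) : PySem.List.pyGet? l (-1) = l.getLast? := by
  unfold PySem.List.pyGet? PySem.List.pyIdx?
  have hl : 0 < l.length := List.length_pos_iff.mpr h
  rw [if_neg (by norm_num : ¬ ((0:Int) ≤ -1))]
  rw [if_pos (by omega : -(l.length:Int) ≤ -1)]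
  have h2 : l.length - ((-(-1:Int)).toNat) = l.length - 1 := by norm_num
  rw [h2]
  simp [List.getLast?_eq_getElem?]

theorem tdc_append : ∀ (f n : Nat) (acc : List Char),
    Nat.toDigitsCore 10 f n acc = Nat.toDigitsCore 10 f n [] ++ acc := by
  intro f
  induction f with
  | zero => intro n acc; simp [Nat.toDigitsCore]
  | succ f ih =>
    intro n acc
    simp only [Nat.toDigitsCore]
    by_cases h : n / 10 = 0
    · simp [h]
    · simp only [h, if_false]
      rw [ih (n/10) ((n % 10).digitChar :: acc), ih (n/10) [(n % 10).digitChar]]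
      simp

theorem toDigits_getLast (n : Nat) : (Nat.toDigits 10 n).getLast? = some (Nat.digitChar (n % 10)) := by
  unfold Nat.toDigits
  simp only [Nat.toDigitsCore]
  by_cases h : n / 10 = 0
  · simp [h]
  · simp only [h, if_false]
    rw [tdc_append]
    simp

theorem pvDig_digitChar (r : Nat) (h : r < 10) : pvDig (Nat.digitChar r) = (r : Int) := by
  interval_cases r <;> decide

theorem pvWgt_succ (o : Int) (k : Nat) :
    pvWgt o (k + 1) = pvWgt (if o ≠ 0 then (0:Int) else 1) k := by
  by_cases ho : o ≠ 0 <;> by_cases hk : k % 2 = 0 <;>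
    simp [pvWgt, ho, hk, Nat.add_mod] <;> omega

theorem pvWgt_iter (m : Nat) (o : Int) :
    (if ((fun x : Int => if x ≠ 0 then 0 else 1)^[m] o) ≠ 0 then (2:Int) else 1) = pvWgt o m := by
  induction m generalizing o with
  | zero => by_cases ho : o ≠ 0 <;> simp [pvWgt, ho]
  | succ m ih =>
    rw [Function.iterate_succ_apply, ih, pvWgt_succ]

theorem L_takeset (vt : List Int) (j : Nat) (w : Int) (h : j < vt.length) :
    (vt.take (j + 1)).set j w = vt.take j ++ [w] := by
  rw [List.set_eq_take_append_cons_drop, if_pos (by simp; omega), List.take_take]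
  simp

-- A's vekttall loop, characterised
theorem L_vt : ∀ (m p : Nat) (vt : List Int) (o : Int), m ≤ p + 1 → p < vt.length →
    (List.range m).foldl
      (fun (st : List Int × Int) k =>
        if st.2 ≠ 0 then (st.1.set (p - k) 2, 0) else (st.1.set (p - k) 1, 1)) (vt, o)
    = (vt.take (p + 1 - m) ++ (List.range m).map (fun t => pvWgt o (m - 1 - t)) ++ vt.drop (p + 1),
       (fun x : Int => if x ≠ 0 then 0 else 1)^[m] o) := by
  intro m
  induction m with
  | zero => intro p vt o _ _; simp
  | succ m ih =>
    intro p vt o hm hp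
    rw [List.range_succ, List.foldl_append, ih p vt o (by omega) hp]
    simp only [List.foldl_cons, List.foldl_nil]
    have hT := pvWgt_iter m o
    set oT := (fun x : Int => if x ≠ 0 then 0 else 1)^[m] o with hoT
    have htk : p + 1 - m = (p - m) + 1 := by omega
    have hset : ∀ w : Int,
        ((vt.take (p + 1 - m) ++ (List.range m).map (fun t => pvWgt o (m - 1 - t)) ++ vt.drop (p + 1)).set (p - m) w)
        = vt.take (p - m) ++ (w :: (List.range m).map (fun t => pvWgt o (m - 1 - t))) ++ vt.drop (p + 1) := by
      intro w
      rw [List.append_assoc, List.set_append,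
          if_pos (by rw [List.length_take]; omega),
          htk, L_takeset vt (p - m) w (by omega), List.append_assoc, List.append_assoc]
      simp
    have hmap : (List.range m ++ [m]).map (fun t => pvWgt o (m + 1 - 1 - t))
        = pvWgt o m :: (List.range m).map (fun t => pvWgt o (m - 1 - t)) := by
      rw [← List.range_succ, List.range_succ_eq_map, List.map_cons, List.map_map]
      have h0 : m + 1 - 1 - 0 = m := by omega
      have hc : ∀ t : Nat, m + 1 - 1 - (t + 1) = m - 1 - t := by omega
      simp only [h0]
      congr 1
      apply List.map_congr_left
      intro t _
      simp only [Function.comp_apply, Nat.succ_eq_add_one, hc]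
    have hgoal2 : p + 1 - (m + 1) = p - m := by omega
    by_cases ho : oT ≠ 0
    · rw [if_pos ho]
      rw [Prod.mk.injEq]
      constructor
      · rw [hset 2, hgoal2, hmap]
        have : pvWgt o m = 2 := by rw [← hT, if_pos ho]
        rw [this]
      · rw [Function.iterate_succ_apply', ← hoT, if_pos ho]
    · rw [if_neg ho]
      rw [Prod.mk.injEq]
      constructor
      · rw [hset 1, hgoal2, hmap]
        have : pvWgt o m = 1 := by rw [← hT, if_neg ho]
        rw [this]
      · rw [Function.iterate_succ_apply', ← hoT, if_neg ho]

theorem L_set (g : Nat → Int) : ∀ (m : Nat) (init : List Int), m ≤ init.length →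
    (List.range m).foldl (fun p k => p.set k (g k)) init = (List.range m).map g ++ init.drop m := by
  intro m
  induction m with
  | zero => intro init _; simp
  | succ m ih =>
    intro init hm
    rw [List.range_succ, List.foldl_append, ih init (by omega), List.map_append]
    have hlen : ((List.range m).map g).length = m := by simp
    simp only [List.foldl_cons, List.foldl_nil]
    rw [List.set_append]
    rw [if_neg (by omega)]
    rw [hlen]
    have : m - m = 0 := by omega
    rw [this]
    rw [List.drop_eq_getElem_cons (by omega : m < init.length)]
    rw [List.set_cons_zero]
    simp

theorem L_digit (d : Int) (k : Nat) (h0 : 0 ≤ d) (h9 : d ≤ 9) :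
    pvDsum (d * pvWgt 1 k) = if k % 2 = 0 then pvDs2 d else d := by
  have h1 : pvWgt 1 k = if k % 2 = 0 then 2 else 1 := by simp [pvWgt]
  rw [h1]
  by_cases hk : k % 2 = 0
  · rw [if_pos hk, if_pos hk]
    interval_cases d <;> decide
  · rw [if_neg hk, if_neg hk]
    interval_cases d <;> decide

theorem L_Asum : ∀ (ds : List Int), (∀ d ∈ ds, 0 ≤ d ∧ d ≤ 9) →
    ((List.range ds.length).map (fun i => pvDsum (ds.getD i 0 * pvWgt 1 (ds.length - 1 - i)))).sum
      = pvS ds := by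
  intro ds
  induction ds with
  | nil => intro _; simp [pvS]
  | cons d t ih =>
    intro hb
    rw [List.length_cons, List.range_succ_eq_map, List.map_cons, List.map_map, List.sum_cons]
    have h1 : (d :: t).getD 0 0 * pvWgt 1 (t.length + 1 - 1 - 0) = d * pvWgt 1 t.length := by
      simp
    rw [h1]
    have h2 : ((List.range t.length).map
        ((fun i => pvDsum ((d :: t).getD i 0 * pvWgt 1 (t.length + 1 - 1 - i))) ∘ Nat.succ))
        = (List.range t.length).map (fun i => pvDsum (t.getD i 0 * pvWgt 1 (t.length - 1 - i))) := by
      apply List.map_congr_left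
      intro k hk
      have hc : t.length + 1 - 1 - (k + 1) = t.length - 1 - k := by omega
      simp only [Function.comp_apply, Nat.succ_eq_add_one, List.getD_cons_succ, hc]
    rw [h2, ih (fun d hd => hb d (List.mem_cons_of_mem _ hd))]
    have hd := hb d (List.mem_cons_self)
    rw [L_digit d t.length hd.1 hd.2]
    simp [pvS]

theorem pvS_nonneg : ∀ (ds : List Int), (∀ d ∈ ds, 0 ≤ d) → 0 ≤ pvS ds := by
  intro ds
  induction ds with
  | nil => intro _; simp [pvS]
  | cons d t ih =>
    intro hb
    have hd := hb d (List.mem_cons_self)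
    have ht := ih (fun d hd => hb d (List.mem_cons_of_mem _ hd))
    unfold pvS pvDs2
    split_ifs <;> omega

-- B's loop body, named for the proofs
def pvBf (st : Int × Int) (ch : Char) : Int × Int :=
  if st.2 = 2 then (st.1 + (if 2 * pvDig ch < 10 then 2 * pvDig ch else 2 * pvDig ch - 9), 1)
  else (st.1 + pvDig ch, 2)

theorem sum_flatMap_int (l : List Int) (f : Int → List Int) :
    (l.flatMap f).sum = (l.map (fun p => (f p).sum)).sum := by
  induction l with
  | nil => simp
  | cons a l ih => simp [ih]

theorem L_B : ∀ (l : List Char),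
    l.reverse.foldl pvBf (0, 2) = (pvS (l.map pvDig), if l.length % 2 = 0 then 2 else 1) := by
  intro l
  induction l with
  | nil => simp [pvS]
  | cons c l ih =>
    rw [List.reverse_cons, List.foldl_append, ih]
    simp only [List.foldl_cons, List.foldl_nil]
    by_cases he : l.length % 2 = 0
    · rw [if_pos he]
      simp only [pvBf]
      have h1 : (l.length + 1) % 2 ≠ 0 := by omega
      rw [List.length_cons, if_neg h1]
      simp only [List.map_cons, pvS, List.length_map, he, if_pos, pvDs2]
      rw [Prod.mk.injEq]
      constructor
      · ring
      · rfl
    · rw [if_neg he]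
      have hne : (1:Int) ≠ 2 := by norm_num
      simp only [pvBf, if_neg hne]
      have h1 : (l.length + 1) % 2 = 0 := by omega
      rw [List.length_cons, if_pos h1]
      simp only [List.map_cons, pvS, List.length_map]
      rw [Prod.mk.injEq]
      constructor
      · rw [if_neg he]; ring
      · rfl

theorem L_Balt (f : String) :
    modulus10_alt f = PySem.Int.toStr (PySem.Int.mod (10 - PySem.Int.mod (pvS (f.toList.map pvDig)) 10) 10) := by
  unfold modulus10_alt
  have hfun : (fun (st : Int × Int) ch =>
      let d := pvDig ch
      if st.2 = 2 then (st.1 + (if 2 * d < 10 then 2 * d else 2 * d - 9), 1)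
      else (st.1 + d, 2)) = pvBf := rfl
  rw [hfun, L_B]

-- A's whole computation, characterised
theorem L_A (f : String) (hpre : Pre_modulus10 f) :
    modulus10 f = (if pvS (f.toList.map pvDig) % 10 = 0 then "0"
                   else PySem.Int.toStr (10 - pvS (f.toList.map pvDig) % 10)) := by
  have hb : ∀ d ∈ f.toList.map pvDig, 0 ≤ d ∧ d ≤ 9 := by
    intro d hd
    obtain ⟨c, hc, rfl⟩ := List.mem_map.mp hd
    exact pvDig_bounds c (pre_mem f hpre c hc)
  have hS0 : 0 ≤ pvS (f.toList.map pvDig) := pvS_nonneg _ (fun d hd => (hb d hd).1)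
  rcases Nat.eq_zero_or_pos f.toList.length with hn0 | hn1
  · have hL : f.toList = [] := List.eq_nil_of_length_eq_zero hn0
    unfold modulus10
    rw [hL]
    decide
  · -- n ≥ 1
    simp only [modulus10, List.length_map]
    set L := f.toList with hLdef
    set n := L.length with hndef
    set ds := L.map pvDig with hdsdef
    rw [pyRange_down n, List.foldl_map]
    rw [PySem.List.foldl_congr_mem (List.range n) _
        (fun (st : List Int × Int) k =>
          if st.2 ≠ 0 then (st.1.set (n - 1 - k) 2, 0) else (st.1.set (n - 1 - k) 1, 1)) _
        (by
          intro acc k hk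
          have hk' : k < n := List.mem_range.mp hk
          have ht : ((n:Int) - 1 - (k:Int)).toNat = n - 1 - k := by omega
          rw [ht])]
    rw [L_vt n (n-1) (List.replicate n 0) 1 (by omega) (by simp; omega)]
    have hp1 : n - 1 + 1 = n := by omega
    rw [hp1]
    simp only [Nat.sub_self, List.take_zero, List.drop_replicate, Nat.sub_self,
      List.nil_append]
    simp only [List.replicate_zero, List.append_nil]
    rw [PySem.List.pyRange_zero_natCast n, List.foldl_map]
    rw [PySem.List.foldl_congr_mem (List.range n) _
        (fun (p : List Int) k => p.set k (ds.getD k 0 * pvWgt 1 (n - 1 - k))) _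
        (by
          intro acc k hk
          have hk' : k < n := List.mem_range.mp hk
          rw [Int.toNat_natCast, PySem.List.pyGetD_natCast, PySem.List.pyGetD_natCast,
              PySem.List.getD_map_range _ _ _ _ hk'])]
    rw [L_set (fun k => ds.getD k 0 * pvWgt 1 (n - 1 - k)) n (List.replicate n 0) (by simp)]
    simp only [List.drop_replicate, Nat.sub_self, List.replicate_zero, List.append_nil]
    rw [← List.sum_eq_foldl, sum_flatMap_int, List.map_map]
    have hdl : ds.length = n := by rw [hdsdef, List.length_map, ← hndef]
    have hAs := L_Asum ds hb
    rw [hdl] at hAs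
    simp only [pvDsum] at hAs
    simp only [Function.comp_def]
    rw [hAs]
    have hlast : (PySem.List.pyGet? (List.map pvDig (PySem.Int.toChars (pvS ds))) (-1)).getD 0
        = pvS ds % 10 := by
      have hnn : ¬ pvS ds < 0 := not_lt.mpr hS0
      rw [show PySem.Int.toChars (pvS ds) = Nat.toDigits 10 (pvS ds).toNat from by
        unfold PySem.Int.toChars; rw [if_neg hnn]]
      have hne : (Nat.toDigits 10 (pvS ds).toNat).map pvDig ≠ [] := by
        apply List.ne_nil_of_length_pos
        simp [Nat.length_toDigits_pos]
      rw [pyGet_neg_one _ hne, List.getLast?_map, toDigits_getLast]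
      simp only [Option.map_some, Option.getD_some]
      rw [pvDig_digitChar _ (Nat.mod_lt _ (by norm_num))]
      omega
    rw [hlast]

-- ===== VERDICT (by name: the statement is the Claim_ definition above) =====
theorem modulus10_spec : Claim_equal_modulus10 := by
  intro f _ hpre
  unfold Spec_modulus10
  rw [L_A f hpre, L_Balt f]
  set s := pvS (f.toList.map pvDig) with hs
  have hS0 : 0 ≤ s := by
    apply pvS_nonneg
    intro d hd
    obtain ⟨c, hc, rfl⟩ := List.mem_map.mp hd
    exact (pvDig_bounds c (pre_mem f hpre c hc)).1
  rw [PySem.Int.mod_eq_emod_of_pos (by norm_num), PySem.Int.mod_eq_emod_of_pos (by norm_num)]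
  have hr0 : 0 ≤ s % 10 := Int.emod_nonneg s (by norm_num)
  have hr9 : s % 10 < 10 := Int.emod_lt_of_pos s (by norm_num)
  by_cases h : s % 10 = 0
  · rw [if_pos h, h]
    norm_num
    decide
  · rw [if_neg h]
    have h2 : (10 - s % 10) % 10 = 10 - s % 10 := Int.emod_eq_of_lt (by omega) (by omega)
    rw [h2]
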